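-- pv_equiv track=rewrite | github.com/akoyamp/edges---PSI | edges/flow_matching.py | matches_classifications
-- ===== SOURCE A (Python) =====
-- def matches_classifications(cf_classifications, dataset_classifications):
--     """Match CF classification codes to dataset classifications."""
--     if isinstance(cf_classifications, dict):
--         cf_classifications = [
--             (scheme, code)
--             for scheme, codes in cf_classifications.items()
--             for code in codes
--         ]
--     elif isinstance(cf_classifications, (list, tuple)):
--         if all(
--             isinstance(x, tuple) and isinstance(x[1], (list, tuple))
--             for x in cf_classifications
--         ):
--             # Convert from tuple of tuples like (('cpc', ('01.1',)),) -> [('cpc', '01.1')]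
--             cf_classifications = [
--                 (scheme, code) for scheme, codes in cf_classifications for code in codes
--             ]
--
--     dataset_codes = [
--         (scheme, code.split(":")[0].strip()) for scheme, code in dataset_classifications
--     ]
--
--     for scheme, code in dataset_codes:
--         if any(
--             code.startswith(cf_code)
--             and scheme.lower().strip() == cf_scheme.lower().strip()
--             for cf_scheme, cf_code in cf_classifications
--         ):
--             return True
--     return False
-- ===== SOURCE B (Python) =====
-- def matches_classifications(cf_classifications, dataset_classifications):
--     """Match CF classification codes to dataset classifications."""
--     if isinstance(cf_classifications, dict):
--         cf_classifications = [
--             (scheme, code)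
--             for scheme, codes in cf_classifications.items()
--             for code in codes
--         ]
--     elif isinstance(cf_classifications, (list, tuple)):
--         if all(
--             isinstance(x, tuple) and isinstance(x[1], (list, tuple))
--             for x in cf_classifications
--         ):
--             cf_classifications = [
--                 (scheme, code) for scheme, codes in cf_classifications for code in codes
--             ]
--
--     # Index the cf codes once: normalized scheme -> set of its cf codes.
--     index = {}
--     for cf_scheme, cf_code in cf_classifications:
--         index.setdefault(cf_scheme.lower().strip(), set()).add(cf_code)
--
--     for scheme, code in dataset_classifications:
--         codes = index.get(scheme.lower().strip(), set())
--         c = code.split(":")[0].strip()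
--         # some cf code is a prefix of c  <=>  some prefix of c is in the set
--         for i in range(len(c) + 1):
--             if c[:i] in codes:
--                 return True
--     return False
-- ===== Notes on version B (the rewrite author's own statement) =====
-- stated objective: faster
-- what changed: A rescans the whole flattened cf list (with repeated scheme re-normalization and startswith) for every dataset entry; B builds a dict from normalized scheme to the set of its cf codes once, then for each dataset entry looks up its scheme and tests each prefix of the cleaned code for set membership.
import Mathlib
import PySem

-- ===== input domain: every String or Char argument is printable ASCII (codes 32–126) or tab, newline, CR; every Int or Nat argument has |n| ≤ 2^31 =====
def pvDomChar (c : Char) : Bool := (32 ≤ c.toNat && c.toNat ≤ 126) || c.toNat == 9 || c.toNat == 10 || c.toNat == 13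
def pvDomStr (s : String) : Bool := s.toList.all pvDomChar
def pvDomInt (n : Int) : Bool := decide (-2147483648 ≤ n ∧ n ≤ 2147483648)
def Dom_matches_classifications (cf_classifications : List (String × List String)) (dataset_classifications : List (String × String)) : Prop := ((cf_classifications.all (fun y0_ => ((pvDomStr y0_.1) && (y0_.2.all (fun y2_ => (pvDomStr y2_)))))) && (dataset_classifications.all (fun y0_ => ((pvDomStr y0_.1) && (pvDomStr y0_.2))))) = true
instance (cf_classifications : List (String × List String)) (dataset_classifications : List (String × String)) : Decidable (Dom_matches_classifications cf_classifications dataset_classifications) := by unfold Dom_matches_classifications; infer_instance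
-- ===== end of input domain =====

-- B replaces A's nested scan over all (scheme, code) pairs per dataset entry by a dict built once
-- (normalized scheme -> set of cf codes) plus a prefix-enumeration set-membership test; a timing run measured B faster.


-- ===== PORT A =====
-- scheme.lower().strip()
def pvNorm (s : String) : String := PySem.Str.strip (PySem.Str.lower s)

-- code.split(":")[0].strip()  (split with nonempty sep always returns a nonempty list, so [0] never raises)
def pvClean (code : String) : String :=
  PySem.Str.strip (PySem.List.pyGetD ((PySem.Str.split? code ":").getD []) 0 "")

-- the 'for scheme, code in dataset_codes: if any(...): return True' loop
def pvLoopA (cfp : List (String × String)) : List (String × String) → Bool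
  | [] => false
  | (scheme, code) :: rest =>
    if cfp.any (fun q => PySem.Str.startswith code q.2 && (pvNorm scheme == pvNorm q.1))
    then true else pvLoopA cfp rest

def matches_classifications (cf_classifications : List (String × List String)) (dataset_classifications : List (String × String)) : Bool :=
  -- under the type convention cf_classifications is a list of (scheme, codes) pairs, so the
  -- normalization branch always flattens it
  let cfp := cf_classifications.flatMap (fun p => p.2.map (fun c => (p.1, c)))
  let dataset_codes := dataset_classifications.map (fun p => (p.1, pvClean p.2))
  pvLoopA cfp dataset_codes

-- ===== PORT B =====
-- index.setdefault(scheme.lower().strip(), set()).add(code)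
def pvIndexB (cfp : List (String × String)) : PySem.Dict String (PySem.Set String) :=
  cfp.foldl (fun d q => d.modify (pvNorm q.1) PySem.Set.empty (fun s => PySem.Set.add s q.2)) PySem.Dict.empty

-- the dataset loop: look up the scheme's code set, test every prefix of the cleaned code
def pvLoopB (index : PySem.Dict String (PySem.Set String)) : List (String × String) → Bool
  | [] => false
  | (scheme, code) :: rest =>
    let codes := index.getD (pvNorm scheme) PySem.Set.empty
    let c := pvClean code
    if (PySem.List.pyRange 0 (PySem.Str.len c + 1) 1).any
         (fun i => PySem.Set.contains codes (PySem.Str.slice c none (some i)))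
    then true else pvLoopB index rest

def matches_classifications_alt (cf_classifications : List (String × List String)) (dataset_classifications : List (String × String)) : Bool :=
  let cfp := cf_classifications.flatMap (fun p => p.2.map (fun c => (p.1, c)))
  pvLoopB (pvIndexB cfp) dataset_classifications

-- ===== PRECONDITION & SPEC =====
def Spec_matches_classifications (cf_classifications : List (String × List String)) (dataset_classifications : List (String × String)) (out : Bool) : Prop := out = matches_classifications_alt cf_classifications dataset_classifications
instance (cf_classifications : List (String × List String)) (dataset_classifications : List (String × String)) (out : Bool) : Decidable (Spec_matches_classifications cf_classifications dataset_classifications out) := by unfold Spec_matches_classifications; infer_instance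

-- ===== CLAIM (what is proved, stated in full; the proofs are below) =====
def Claim_equal_matches_classifications : Prop := ∀ (cf_classifications : List (String × List String)) (dataset_classifications : List (String × String)), Dom_matches_classifications cf_classifications dataset_classifications → Spec_matches_classifications cf_classifications dataset_classifications (matches_classifications cf_classifications dataset_classifications)

-- ===== LEMMAS AND PROOFS =====

-- the grouped dict's entry at k holds exactly the codes of pairs whose normalized scheme is k
lemma pv_mem_group (l : List (String × String)) (d : PySem.Dict String (PySem.Set String))
    (k x : String) :
    x ∈ (l.foldl (fun d q => d.modify (pvNorm q.1) PySem.Set.empty (fun s => PySem.Set.add s q.2)) d).getD k PySem.Set.empty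
      ↔ x ∈ d.getD k PySem.Set.empty ∨ ∃ q ∈ l, pvNorm q.1 = k ∧ q.2 = x := by
  induction l generalizing d with
  | nil =>
    simp only [List.foldl_nil, List.not_mem_nil, false_and, exists_false, or_false]
  | cons q rest ih =>
    rw [List.foldl_cons, ih, PySem.Dict.getD_modify]
    simp only [List.mem_cons]
    split_ifs with hk
    · subst hk
      rw [PySem.Set.mem_add]
      constructor
      · rintro (⟨h | h⟩ | h)
        · exact Or.inl h
        · exact Or.inr ⟨q, Or.inl rfl, rfl, h.symm⟩
        · obtain ⟨p, hp, h1, h2⟩ := h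
          exact Or.inr ⟨p, Or.inr hp, h1, h2⟩
      · rintro (h | ⟨p, hp | hp, h1, h2⟩)
        · exact Or.inl (Or.inl h)
        · subst hp; exact Or.inl (Or.inr h2.symm)
        · exact Or.inr ⟨p, hp, h1, h2⟩
    · constructor
      · rintro (h | ⟨p, hp, h1, h2⟩)
        · exact Or.inl h
        · exact Or.inr ⟨p, Or.inr hp, h1, h2⟩
      · rintro (h | ⟨p, hp | hp, h1, h2⟩)
        · exact Or.inl h
        · subst hp; exact absurd h1.symm hk
        · exact Or.inr ⟨p, hp, h1, h2⟩

-- per-dataset-entry: A's any over all cf pairs equals B's prefix-membership test in the indexed set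
lemma pv_body_eq (cfp : List (String × String)) (scheme c : String) :
    cfp.any (fun q => PySem.Str.startswith c q.2 && (pvNorm scheme == pvNorm q.1))
      = (PySem.List.pyRange 0 (PySem.Str.len c + 1) 1).any
          (fun i => PySem.Set.contains ((pvIndexB cfp).getD (pvNorm scheme) PySem.Set.empty)
            (PySem.Str.slice c none (some i))) := by
  rcases hb : (PySem.List.pyRange 0 (PySem.Str.len c + 1) 1).any
      (fun i => PySem.Set.contains ((pvIndexB cfp).getD (pvNorm scheme) PySem.Set.empty)
        (PySem.Str.slice c none (some i))) with _ | _
  · -- B side false: show A side false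
    rw [List.any_eq_false] at hb ⊢
    rintro ⟨s, t⟩ hq
    simp only [Bool.and_eq_true, beq_iff_eq, not_and] at *
    intro hpre heq
    rw [PySem.Str.startswith_eq, PySem.Chars.startswith_iff] at hpre
    have hlen : (t.toList.length : Int) ∈ PySem.List.pyRange 0 (PySem.Str.len c + 1) 1 := by
      rw [PySem.List.mem_pyRange_one]
      have := hpre.length_le
      rw [PySem.Str.len_eq]
      omega
    have := hb _ hlen
    apply this
    rw [PySem.Set.contains_iff]
    have hsl : PySem.Str.slice c none (some (t.toList.length : Int)) = t := by
      apply String.toList_inj.mp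
      rw [PySem.Str.toList_slice]
      show PySem.List.slice c.toList none (some (t.toList.length : Int)) = t.toList
      rw [PySem.List.slice_to_natCast]
      exact (List.prefix_iff_eq_take.mp hpre).symm
    rw [hsl]
    rw [pvIndexB, pv_mem_group]
    exact Or.inr ⟨(s, t), hq, heq.symm, rfl⟩
  · -- B side true: show A side true
    rw [List.any_eq_true] at hb ⊢
    obtain ⟨i, hi, hmem⟩ := hb
    rw [PySem.List.mem_pyRange_one] at hi
    rw [PySem.Set.contains_iff, pvIndexB, pv_mem_group] at hmem
    rcases hmem with h | ⟨q, hq, hnorm, hcode⟩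
    · simp at h
    refine ⟨q, hq, ?_⟩
    simp only [Bool.and_eq_true, beq_iff_eq]
    refine ⟨?_, hnorm.symm⟩
    rw [PySem.Str.startswith_eq, PySem.Chars.startswith_iff, hcode]
    have : (PySem.Str.slice c none (some i)).toList = c.toList.take i.toNat := by
      rw [PySem.Str.toList_slice]
      exact PySem.List.slice_to c.toList hi.1
    rw [this]
    exact List.take_prefix _ _

-- the two loops agree
lemma pv_loop_eq (cfp : List (String × String)) (ds : List (String × String)) :
    pvLoopA cfp (ds.map (fun p => (p.1, pvClean p.2))) = pvLoopB (pvIndexB cfp) ds := by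
  induction ds with
  | nil => rfl
  | cons p rest ih =>
    obtain ⟨scheme, code⟩ := p
    simp only [List.map_cons, pvLoopA, pvLoopB]
    rw [pv_body_eq cfp scheme (pvClean code), ih]

-- ===== VERDICT (by name: the statement is the Claim_ definition above) =====
theorem matches_classifications_spec : Claim_equal_matches_classifications := by
  intro cf ds _
  unfold Spec_matches_classifications matches_classifications matches_classifications_alt
  exact pv_loop_eq _ ds
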